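-- pv_equiv track=rewrite | github.com/bhjia-phys/AITP-Research-Protocol | research/knowledge-hub/knowledge_hub/iteration_journal_support.py | _reuse_unit_ids
-- ===== SOURCE A (Python) =====
-- from typing import Any
--
-- def _reuse_unit_ids(context: dict[str, Any] | None) -> list[str]:
--     if not context:
--         return []
--     ids: list[str] = []
--     seen: set[str] = set()
--     for key in ("canonical_hits", "staged_hits"):
--         for row in context.get(key) or []:
--             unit_id = str(row.get("id") or "").strip()
--             if unit_id and unit_id not in seen:
--                 seen.add(unit_id)
--                 ids.append(unit_id)
--     return ids
-- ===== SOURCE B (Python) =====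
-- from typing import Any
--
-- def _reuse_unit_ids(context: dict[str, Any] | None) -> list[str]:
--     if not context:
--         return []
--
--     def ids_of(rows):
--         return [str(row.get("id") or "").strip() for row in rows]
--
--     raw = ids_of(context.get("canonical_hits") or []) + ids_of(
--         context.get("staged_hits") or []
--     )
--
--     def dedup(xs):
--         # keep-first dedup by recursion: keep the head (if non-empty) and
--         # filter every later copy of it out of the recursively deduped tail
--         if not xs:
--             return []
--         head = xs[0]
--         tail = [u for u in dedup(xs[1:]) if u != head]
--         return ([head] if head else []) + tail
--
--     return dedup(raw)
-- ===== Notes on version B (the rewrite author's own statement) =====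
-- stated objective: alternative
-- what changed: A's single interleaved loop carrying an explicit seen-set is replaced by materializing the two id lists and then a recursive keep-first dedup that, at each step, filters the head's later copies out of the recursively deduped tail (no seen-set, no dict).
import Mathlib
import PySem

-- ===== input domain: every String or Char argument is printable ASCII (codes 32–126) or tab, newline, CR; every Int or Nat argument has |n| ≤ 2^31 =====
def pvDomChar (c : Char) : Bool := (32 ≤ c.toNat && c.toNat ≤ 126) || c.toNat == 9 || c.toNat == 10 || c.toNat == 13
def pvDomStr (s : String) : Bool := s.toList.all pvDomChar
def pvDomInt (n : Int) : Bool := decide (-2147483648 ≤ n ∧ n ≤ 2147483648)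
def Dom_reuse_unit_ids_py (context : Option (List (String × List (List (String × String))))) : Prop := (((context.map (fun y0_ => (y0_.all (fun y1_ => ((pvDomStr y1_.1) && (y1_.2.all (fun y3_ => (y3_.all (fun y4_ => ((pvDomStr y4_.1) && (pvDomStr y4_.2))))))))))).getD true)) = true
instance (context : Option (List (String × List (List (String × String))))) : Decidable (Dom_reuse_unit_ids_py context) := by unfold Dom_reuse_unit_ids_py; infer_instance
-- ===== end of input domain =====

-- B replaces A's interleaved loop with a seen-set by: materialize the two id lists, then a
-- RECURSIVE keep-first dedup (filter the head's later copies out of the deduped tail); alternative decomposition, same result.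


-- ===== PORT A =====
-- literal port of A: one interleaved loop over both key lists, carrying (ids, seen)
def reuse_unit_ids_py (context : Option (List (String × List (List (String × String))))) : List String :=
  match context with
  | none => []
  | some ctx =>
    if ctx.isEmpty then []
    else
      (["canonical_hits", "staged_hits"].foldl
        (fun (acc : List String × PySem.Set String) key =>
          (((PySem.Dict.mk ctx).get? key).getD []).foldl
            (fun (acc2 : List String × PySem.Set String) row =>
              let unit_id := PySem.Str.strip (((PySem.Dict.mk row).get? "id").getD "")
              if unit_id ≠ "" ∧ ¬ (PySem.Set.contains acc2.2 unit_id = true) then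
                (acc2.1 ++ [unit_id], PySem.Set.add acc2.2 unit_id)
              else acc2)
            acc)
        ([], PySem.Set.empty)).1

-- ===== PORT B =====
-- B's helper ids_of: strip the "id" field of every row
def pvIdsOf (rows : List (List (String × String))) : List String :=
  rows.map (fun row => PySem.Str.strip (((PySem.Dict.mk row).get? "id").getD ""))

-- B's helper dedup: recursive keep-first dedup dropping empty ids
def pvDedupKeep : List String → List String
  | [] => []
  | head :: rest =>
    (if head ≠ "" then [head] else []) ++ (pvDedupKeep rest).filter (fun u => u ≠ head)

-- literal port of B: build the two stripped-id lists, concatenate, then recursive dedup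
def reuse_unit_ids_py_alt (context : Option (List (String × List (List (String × String))))) : List String :=
  match context with
  | none => []
  | some ctx =>
    if ctx.isEmpty then []
    else
      let raw := pvIdsOf (((PySem.Dict.mk ctx).get? "canonical_hits").getD [])
                  ++ pvIdsOf (((PySem.Dict.mk ctx).get? "staged_hits").getD [])
      pvDedupKeep raw

-- ===== PRECONDITION & SPEC =====
def Spec_reuse_unit_ids_py (context : Option (List (String × List (List (String × String))))) (out : List String) : Prop := out = reuse_unit_ids_py_alt context
instance (context : Option (List (String × List (List (String × String))))) (out : List String) : Decidable (Spec_reuse_unit_ids_py context out) := by unfold Spec_reuse_unit_ids_py; infer_instance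

-- ===== CLAIM (what is proved, stated in full; the proofs are below) =====
def Claim_equal_reuse_unit_ids_py : Prop := ∀ (context : Option (List (String × List (List (String × String))))), Dom_reuse_unit_ids_py context → Spec_reuse_unit_ids_py context (reuse_unit_ids_py context)

-- ===== LEMMAS AND PROOFS =====

theorem contains_eq_decide_mem {α : Type} [BEq α] [LawfulBEq α] [DecidableEq α] (s : PySem.Set α) (x : α) :
    PySem.Set.contains s x = decide (x ∈ s) := by
  simp [PySem.Set.contains]

theorem add_of_mem {α : Type} [BEq α] [LawfulBEq α] [DecidableEq α] (s : PySem.Set α) (x : α) (h : x ∈ s) :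
    PySem.Set.add s x = s := by
  unfold PySem.Set.add
  rw [if_pos]
  rw [contains_eq_decide_mem]; simpa

theorem add_of_not_mem {α : Type} [BEq α] [LawfulBEq α] [DecidableEq α] (s : PySem.Set α) (x : α) (h : x ∉ s) :
    PySem.Set.add s x = s ++ [x] := by
  unfold PySem.Set.add
  rw [if_neg]
  rw [contains_eq_decide_mem]; simpa

-- folding Set.add from an arbitrary start equals ofList filtered by what the start already contains
theorem foldl_add_eq_append_filter {α : Type} [BEq α] [LawfulBEq α] [DecidableEq α]
    (xs : List α) (s : PySem.Set α) :
    xs.foldl PySem.Set.add s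
      = s ++ (xs.foldl PySem.Set.add PySem.Set.empty).filter (fun x => !decide (x ∈ s)) := by
  induction xs generalizing s with
  | nil => simp [PySem.Set.empty]
  | cons v xs ih =>
    simp only [List.foldl_cons]
    rw [ih (PySem.Set.add s v), ih (PySem.Set.add PySem.Set.empty v)]
    have hadd0 : PySem.Set.add (PySem.Set.empty) v = [v] :=
      add_of_not_mem _ _ (by simp [PySem.Set.empty])
    rw [hadd0]
    by_cases hv : v ∈ s
    · rw [add_of_mem s v hv]
      simp only [List.singleton_append, List.filter_cons, List.filter_filter]
      rw [show (!decide (v ∈ s)) = false by simp [hv]]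
      simp only [Bool.false_eq_true, if_false, List.append_cancel_left_eq]
      apply List.filter_congr
      intro x _
      rcases eq_or_ne x v with rfl | hx
      · simp [hv]
      · simp [hx]
    · rw [add_of_not_mem s v hv]
      simp only [List.singleton_append, List.filter_cons, List.filter_filter]
      rw [show (!decide (v ∈ s)) = true by simp [hv]]
      simp only [if_true, List.append_assoc, List.cons_append, List.nil_append,
        List.append_cancel_left_eq, List.cons.injEq, true_and]
      apply List.filter_congr
      intro x _
      rcases eq_or_ne x v with rfl | hx
      · simp [hv]
      · simp [hx]

-- PySem.List.dedup peels its head off as a cons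
theorem dedup_cons {α : Type} [BEq α] [LawfulBEq α] [DecidableEq α] (v : α) (xs : List α) :
    PySem.List.dedup (v :: xs)
      = v :: (PySem.List.dedup xs).filter (fun x => !decide (x = v)) := by
  simp only [PySem.List.dedup, PySem.Set.ofList, List.foldl_cons]
  rw [add_of_not_mem _ _ (by simp [PySem.Set.empty])]
  simp only [PySem.Set.empty, List.nil_append]
  rw [foldl_add_eq_append_filter xs [v]]
  simp

-- B's recursive keep-first dedup = full dedup followed by dropping empties
theorem pvDedupKeep_eq (us : List String) :
    pvDedupKeep us = (PySem.List.dedup us).filter (fun u => decide (u ≠ "")) := by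
  induction us with
  | nil => simp [pvDedupKeep, PySem.List.dedup, PySem.Set.ofList, PySem.Set.empty]
  | cons v xs ih =>
    rw [dedup_cons]
    simp only [pvDedupKeep, ih, List.filter_cons, List.filter_filter]
    by_cases hv : v = ""
    · rw [if_neg (by simp [hv]), show (decide (v ≠ "")) = false by simp [hv]]
      simp only [Bool.false_eq_true, if_false, List.nil_append]
      apply List.filter_congr
      intro x _
      rcases eq_or_ne x v with rfl | hx
      · simp [hv]
      · simp [hx]
    · rw [if_pos (by simp [hv]), show (decide (v ≠ "")) = true by simp [hv]]
      simp only [if_true, List.singleton_append, List.cons.injEq, true_and]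
      apply List.filter_congr
      intro x _
      rcases eq_or_ne x v with rfl | hx
      · simp
      · simp [hx, Bool.and_comm]

-- A's interleaved loop over a flat list of ids, characterised via PySem.List.dedup
theorem loopA_eq (us : List String) :
    ∀ (ids : List String) (seen : PySem.Set String),
    (us.foldl
      (fun (acc2 : List String × PySem.Set String) u =>
        if u ≠ "" ∧ ¬ (PySem.Set.contains acc2.2 u = true) then
          (acc2.1 ++ [u], PySem.Set.add acc2.2 u)
        else acc2)
      (ids, seen)).1
    = ids ++ (PySem.List.dedup us).filter
        (fun u => decide (u ≠ "") && !decide (u ∈ seen)) := by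
  induction us with
  | nil => intro ids seen; simp [PySem.List.dedup, PySem.Set.ofList, PySem.Set.empty]
  | cons u us ih =>
    intro ids seen
    rw [dedup_cons]
    simp only [List.foldl_cons, List.filter_cons]
    by_cases hu : u = ""
    · rw [if_neg (by simp [hu])]
      rw [ih ids seen]
      rw [show (decide (u ≠ "") && !decide (u ∈ seen)) = false by simp [hu]]
      simp only [Bool.false_eq_true, if_false, List.filter_filter, List.append_cancel_left_eq]
      apply List.filter_congr
      intro x _
      by_cases hx : x = u
      · subst hx; simp [hu]
      · simp [hx]
    · by_cases hs : u ∈ seen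
      · rw [if_neg (by simp [hs])]
        rw [ih ids seen]
        rw [show (decide (u ≠ "") && !decide (u ∈ seen)) = false by simp [hs]]
        simp only [Bool.false_eq_true, if_false, List.filter_filter, List.append_cancel_left_eq]
        apply List.filter_congr
        intro x _
        by_cases hx : x = u
        · subst hx; simp [hs]
        · simp [hx]
      · rw [if_pos ⟨hu, by simp [hs]⟩]
        rw [ih (ids ++ [u]) (PySem.Set.add seen u)]
        rw [show (decide (u ≠ "") && !decide (u ∈ seen)) = true by simp [hu, hs]]
        rw [add_of_not_mem seen u hs]
        simp only [if_true, List.append_assoc, List.cons_append, List.nil_append,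
          List.filter_filter, List.append_cancel_left_eq, List.cons.injEq, true_and]
        apply List.filter_congr
        intro x _
        by_cases hx : x = u
        · subst hx; simp
        · simp [hx, Bool.and_comm]

-- ===== VERDICT (by name: the statement is the Claim_ definition above) =====
theorem reuse_unit_ids_py_spec : Claim_equal_reuse_unit_ids_py := by
  intro context _
  unfold Spec_reuse_unit_ids_py reuse_unit_ids_py reuse_unit_ids_py_alt
  match context with
  | none => rfl
  | some ctx =>
    by_cases hctx : ctx.isEmpty
    · simp [hctx]
    · simp only [hctx]
      set uid := fun (row : List (String × String)) =>
        PySem.Str.strip (((PySem.Dict.mk row).get? "id").getD "") with huid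
      set rows := fun (key : String) =>
        ((PySem.Dict.mk ctx).get? key).getD [] with hrows
      have inner : ∀ (key : String) (acc : List String × PySem.Set String),
          (rows key).foldl
            (fun (acc2 : List String × PySem.Set String) row =>
              if uid row ≠ "" ∧ ¬ (PySem.Set.contains acc2.2 (uid row) = true) then
                (acc2.1 ++ [uid row], PySem.Set.add acc2.2 (uid row))
              else acc2)
            acc
          = ((rows key).map uid).foldl
            (fun (acc2 : List String × PySem.Set String) u =>
              if u ≠ "" ∧ ¬ (PySem.Set.contains acc2.2 u = true) then
                (acc2.1 ++ [u], PySem.Set.add acc2.2 u)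
              else acc2) acc := by
        intro key acc
        rw [List.foldl_map]
      simp only [List.foldl_cons, List.foldl_nil]
      rw [inner, inner, ← List.foldl_append]
      rw [loopA_eq]
      rw [pvDedupKeep_eq]
      simp only [pvIdsOf, hrows, huid, List.nil_append, PySem.Set.empty]
      apply List.filter_congr
      intro x _
      simp
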